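-- pv_equiv track=rewrite | github.com/981377660LMT/algorithm-study | 22_专题/区间问题/区间操作/删除重叠区间.py | eraseInnerInterval
-- ===== SOURCE A (Python) =====
-- from typing import List, Tuple
--
-- def eraseInnerInterval(intervals: List[Tuple[int, int]]) -> List[Tuple[int, int]]:
--     intervals = sorted(intervals, key=lambda x: (x[1], -x[0]))
--     res = []
--     for interval in intervals:
--         while res:
--             back = res[-1]
--             if back[0] < interval[0]:
--                 break
--             res.pop()
--         res.append(interval)
--     return res
-- ===== SOURCE B (Python) =====
-- from typing import List, Tuple
--
-- def eraseInnerInterval(intervals: List[Tuple[int, int]]) -> List[Tuple[int, int]]: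
--     res = []
--     max_end = None
--     for s, e in sorted(intervals, key=lambda x: (x[0], -x[1])):
--         if max_end is None or e > max_end:
--             res.append((s, e))
--             max_end = e
--     return res
-- ===== Notes on version B (the rewrite author's own statement) =====
-- stated objective: alternative
-- what changed: Replaces the stack with its inner while-pop loop over the (end asc, start desc)-sorted list by a single forward scan over the (start asc, end desc)-sorted list that keeps a scalar running max_end and appends an interval iff its end strictly exceeds it; correct because the non-covered intervals form a chain strictly increasing in both coordinates, so both orders agree.
import Mathlib
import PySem

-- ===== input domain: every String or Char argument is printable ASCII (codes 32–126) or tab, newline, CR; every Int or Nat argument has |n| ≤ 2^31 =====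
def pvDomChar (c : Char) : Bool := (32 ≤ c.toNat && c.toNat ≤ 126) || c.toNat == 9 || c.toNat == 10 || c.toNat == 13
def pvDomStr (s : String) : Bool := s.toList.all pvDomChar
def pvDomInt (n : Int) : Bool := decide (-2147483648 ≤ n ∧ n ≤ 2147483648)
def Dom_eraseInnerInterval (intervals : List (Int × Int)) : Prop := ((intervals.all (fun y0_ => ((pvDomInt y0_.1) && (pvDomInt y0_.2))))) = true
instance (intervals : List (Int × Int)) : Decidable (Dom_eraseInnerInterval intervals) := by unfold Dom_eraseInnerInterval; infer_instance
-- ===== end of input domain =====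

-- B drops A's stack with its inner while-pop loop over the (end asc, start desc)-sorted list
-- in favour of a forward scan over the (start asc, end desc)-sorted list keeping a scalar
-- running max_end (objective: alternative algorithm; same asymptotic cost).

-- ===== PORT A =====
-- the inner `while res: … pop` loop plus the final append; the Python list `res` is kept
-- top-of-stack-first here (head = res[-1]), so the final result is reversed once at the end
def pvPopPush (res : List (Int × Int)) (interval : Int × Int) : List (Int × Int) :=
  match res with
  | [] => [interval]
  | back :: rest =>
    if back.1 < interval.1 then interval :: back :: rest
    else pvPopPush rest interval

def eraseInnerInterval (intervals : List (Int × Int)) : List (Int × Int) :=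
  let intervals := PySem.List.sorted2 intervals (fun x => x.2) (fun x => -x.1) false
  (intervals.foldl pvPopPush []).reverse

-- ===== PORT B =====
-- one step of B's for loop; state = (res, max_end); `res.append((s, e))` is `st.1 ++ [x]`
def pvKeepStep (st : List (Int × Int) × Option Int) (x : Int × Int) :
    List (Int × Int) × Option Int :=
  match st.2 with
  | none => (st.1 ++ [x], some x.2)
  | some m => if m < x.2 then (st.1 ++ [x], some x.2) else st

def eraseInnerInterval_alt (intervals : List (Int × Int)) : List (Int × Int) :=
  ((PySem.List.sorted2 intervals (fun x => x.1) (fun x => -x.2) false).foldl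
    pvKeepStep ([], none)).1

-- ===== PRECONDITION & SPEC =====
def Spec_eraseInnerInterval (intervals : List (Int × Int)) (out : List (Int × Int)) : Prop := out = eraseInnerInterval_alt intervals
instance (intervals : List (Int × Int)) (out : List (Int × Int)) : Decidable (Spec_eraseInnerInterval intervals out) := by unfold Spec_eraseInnerInterval; infer_instance

-- ===== CLAIM (what is proved, stated in full; the proofs are below) =====
def Claim_equal_eraseInnerInterval : Prop := ∀ (intervals : List (Int × Int)), Dom_eraseInnerInterval intervals → Spec_eraseInnerInterval intervals (eraseInnerInterval intervals)

-- ===== LEMMAS AND PROOFS =====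

-- v is "maximal" in L: no other interval of L contains it
def pvMaxl (L : List (Int × Int)) (v : Int × Int) : Prop :=
  ∀ y ∈ L, y.1 ≤ v.1 → v.2 ≤ y.2 → y = v

-- reference selector for A's stack: keep x iff every later element has strictly larger start
def pvSel : List (Int × Int) → List (Int × Int)
  | [] => []
  | x :: xs => if xs.all (fun y => x.1 < y.1) then x :: pvSel xs else pvSel xs

-- recursive form of B's scan
def pvScanB (m : Option Int) : List (Int × Int) → List (Int × Int)
  | [] => []
  | x :: xs =>
    match m with
    | none => x :: pvScanB (some x.2) xs
    | some mm => if mm < x.2 then x :: pvScanB (some x.2) xs else pvScanB (some mm) xs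

-- the coordinate swap-and-negate involution that turns B's scan into pvSel
def pvSig (p : Int × Int) : Int × Int := (-p.2, -p.1)

-- the two sort orders
def pvRE (a b : Int × Int) : Prop := a.2 < b.2 ∨ (a.2 = b.2 ∧ b.1 ≤ a.1)
def pvRS (a b : Int × Int) : Prop := a.1 < b.1 ∨ (a.1 = b.1 ∧ b.2 ≤ a.2)

-- ---- generic: sorted2 is pairwise-ordered by its lexicographic comparison ----

theorem pvInsertBy_pairwise {R : Int × Int → Int × Int → Prop}
    (before : Int × Int → Int × Int → Bool)
    (h1 : ∀ a b, before a b = true → R a b)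
    (h2 : ∀ a b, before a b = false → R b a)
    (htr : ∀ {a b c}, R a b → R b c → R a c)
    (x : Int × Int) (ys : List (Int × Int)) (hys : ys.Pairwise R) :
    (PySem.List.insertBy before x ys).Pairwise R := by
  induction ys with
  | nil => simp [PySem.List.insertBy]
  | cons y ys ih =>
    rcases List.pairwise_cons.mp hys with ⟨hy, hys'⟩
    by_cases hb : before x y = true
    · rw [PySem.List.insertBy, if_pos hb]
      refine List.pairwise_cons.mpr ⟨?_, hys⟩
      intro z hz
      rcases List.mem_cons.mp hz with rfl | hz
      · exact h1 _ _ hb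
      · exact htr (h1 _ _ hb) (hy z hz)
    · rw [PySem.List.insertBy, if_neg hb]
      refine List.pairwise_cons.mpr ⟨?_, ih hys'⟩
      intro z hz
      rcases (PySem.List.insertBy_mem_iff before x z ys).mp hz with rfl | hz
      · exact h2 _ _ (by simpa using hb)
      · exact hy z hz

theorem pvFoldl_insertBy_pairwise {R : Int × Int → Int × Int → Prop}
    (before : Int × Int → Int × Int → Bool)
    (h1 : ∀ a b, before a b = true → R a b)
    (h2 : ∀ a b, before a b = false → R b a)
    (htr : ∀ {a b c}, R a b → R b c → R a c)
    (xs : List (Int × Int)) :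
    ∀ acc : List (Int × Int), acc.Pairwise R →
      (xs.foldl (fun acc x => PySem.List.insertBy before x acc) acc).Pairwise R := by
  induction xs with
  | nil => intro acc h; simpa using h
  | cons x xs ih =>
    intro acc h
    exact ih _ (pvInsertBy_pairwise before h1 h2 htr x acc h)

theorem pvSortedE_pairwise (L : List (Int × Int)) :
    (PySem.List.sorted2 L (fun x => x.2) (fun x => -x.1) false).Pairwise pvRE := by
  refine pvFoldl_insertBy_pairwise _ ?_ ?_ ?_ L [] List.Pairwise.nil
  · intro a b
    by_cases hd : a.2 < b.2 <;> by_cases he : b.2 < a.2 <;> by_cases hf : -a.1 < -b.1 <;>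
      simp [pvRE, hd, he, hf] <;> omega
  · intro a b
    by_cases hd : a.2 < b.2 <;> by_cases he : b.2 < a.2 <;> by_cases hf : -a.1 < -b.1 <;>
      simp [pvRE, hd, he, hf] <;> omega
  · intro a b c hab hbc
    unfold pvRE at *
    omega

theorem pvSortedS_pairwise (L : List (Int × Int)) :
    (PySem.List.sorted2 L (fun x => x.1) (fun x => -x.2) false).Pairwise pvRS := by
  refine pvFoldl_insertBy_pairwise _ ?_ ?_ ?_ L [] List.Pairwise.nil
  · intro a b
    by_cases hd : a.1 < b.1 <;> by_cases he : b.1 < a.1 <;> by_cases hf : -a.2 < -b.2 <;>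
      simp [pvRS, hd, he, hf] <;> omega
  · intro a b
    by_cases hd : a.1 < b.1 <;> by_cases he : b.1 < a.1 <;> by_cases hf : -a.2 < -b.2 <;>
      simp [pvRS, hd, he, hf] <;> omega
  · intro a b c hab hbc
    unfold pvRS at *
    omega

-- ---- A's stack equals pvSel on the sorted list ----

theorem pvPopPush_eq_drop (S : List (Int × Int)) (x : Int × Int) :
    pvPopPush S x = x :: S.dropWhile (fun b => decide (x.1 ≤ b.1)) := by
  induction S with
  | nil => rfl
  | cons b rest ih =>
    by_cases h : b.1 < x.1
    · have hd : (decide (x.1 ≤ b.1)) = false := by simp [not_le.mpr h]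
      simp [pvPopPush, h, hd]
    · have hd : (decide (x.1 ≤ b.1)) = true := by simp [le_of_not_gt h]
      simp [pvPopPush, h, hd, ih]

theorem pvSel_of_pairwise (l : List (Int × Int))
    (h : l.Pairwise (fun a b => a.1 < b.1)) : pvSel l = l := by
  induction l with
  | nil => rfl
  | cons x xs ih =>
    rcases List.pairwise_cons.mp h with ⟨h1, h2⟩
    have : xs.all (fun y => x.1 < y.1) = true := by
      simp only [List.all_eq_true]; intro y hy; exact decide_eq_true (h1 y hy)
    simp [pvSel, this, ih h2]

theorem pvDropWhile_lt {S : List (Int × Int)} {x : Int × Int}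
    (h : S.Pairwise (fun a b => b.1 < a.1)) :
    ∀ k ∈ S.dropWhile (fun b => decide (x.1 ≤ b.1)), k.1 < x.1 := by
  induction S with
  | nil => simp
  | cons b rest ih =>
    rcases List.pairwise_cons.mp h with ⟨h1, h2⟩
    by_cases hb : x.1 ≤ b.1
    · simpa [List.dropWhile, hb] using ih h2
    · intro k hk
      rw [List.dropWhile_cons_of_neg (by simp [hb])] at hk
      rcases List.mem_cons.mp hk with rfl | hk
      · exact lt_of_not_ge hb
      · exact lt_trans (h1 k hk) (lt_of_not_ge hb)

theorem pvSel_middle (P D T : List (Int × Int))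
    (h1 : ∀ d ∈ D, ∃ y ∈ T, y.1 ≤ d.1)
    (h2 : ∀ a ∈ P, ∀ d ∈ D, a.1 < d.1) :
    pvSel (P ++ D ++ T) = pvSel (P ++ T) := by
  induction P with
  | nil =>
    simp only [List.nil_append]
    induction D with
    | nil => simp
    | cons d D' ihD =>
      rcases h1 d (List.mem_cons_self) with ⟨y, hy, hle⟩
      have hcond : ¬ ((D' ++ T).all (fun z => d.1 < z.1) = true) := by
        simp only [List.all_eq_true]
        intro h
        have := h y (List.mem_append_right _ hy)
        exact absurd (of_decide_eq_true this) (not_lt.mpr hle)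
      rw [List.cons_append, pvSel, if_neg hcond]
      exact ihD (fun d' hd => h1 d' (List.mem_cons_of_mem _ hd))
        (fun a ha => absurd ha (List.not_mem_nil))
  | cons a P' ihP =>
    have hcond : ((P' ++ (D ++ T)).all (fun y => a.1 < y.1) = true)
        ↔ ((P' ++ T).all (fun y => a.1 < y.1) = true) := by
      simp only [List.all_eq_true, List.mem_append]
      constructor
      · intro h y hy
        rcases hy with hy | hy
        · exact h y (Or.inl hy)
        · exact h y (Or.inr (Or.inr hy))
      · intro h y hy
        rcases hy with hy | hy | hy
        · exact h y (Or.inl hy)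
        · exact decide_eq_true (h2 a List.mem_cons_self y hy)
        · exact h y (Or.inr hy)
    have ih := ihP (fun p hp => h2 p (List.mem_cons_of_mem _ hp))
    simp only [List.cons_append, List.append_assoc, pvSel] at *
    by_cases hc : (P' ++ T).all (fun y => a.1 < y.1) = true
    · rw [if_pos hc, if_pos (hcond.mpr hc), ih]
    · rw [if_neg hc, if_neg (fun h => hc (hcond.mp h)), ih]

theorem pvStack_eq_sel (L : List (Int × Int)) : ∀ S : List (Int × Int),
    S.Pairwise (fun a b => b.1 < a.1) →
    L.foldl pvPopPush S = (pvSel (S.reverse ++ L)).reverse := by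
  induction L with
  | nil =>
    intro S hS
    have : S.reverse.Pairwise (fun a b => a.1 < b.1) := by
      rw [List.pairwise_reverse]; exact hS
    simp [pvSel_of_pairwise _ this]
  | cons x L' ih =>
    intro S hS
    have hdrop := pvPopPush_eq_drop S x
    set K := S.dropWhile (fun b => decide (x.1 ≤ b.1)) with hK
    have hKsub : K.Sublist S := List.dropWhile_sublist _
    have hKlt : ∀ k ∈ K, k.1 < x.1 := pvDropWhile_lt hS
    have hKpw : (x :: K).Pairwise (fun a b => b.1 < a.1) :=
      List.pairwise_cons.mpr ⟨hKlt, hS.sublist hKsub⟩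
    have hsplit : S = S.takeWhile (fun b => decide (x.1 ≤ b.1)) ++ K :=
      (List.takeWhile_append_dropWhile).symm
    set D := S.takeWhile (fun b => decide (x.1 ≤ b.1)) with hD
    have hDle : ∀ d ∈ D, x.1 ≤ d.1 := by
      intro d hd
      exact of_decide_eq_true (List.mem_takeWhile_imp (p := fun b : Int × Int => decide (x.1 ≤ b.1)) hd)
    calc (x :: L').foldl pvPopPush S
        = L'.foldl pvPopPush (x :: K) := by rw [List.foldl_cons, hdrop]
      _ = (pvSel ((x :: K).reverse ++ L')).reverse := ih _ hKpw
      _ = (pvSel (K.reverse ++ (x :: L'))).reverse := by simp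
      _ = (pvSel (K.reverse ++ D.reverse ++ (x :: L'))).reverse := by
            rw [pvSel_middle K.reverse D.reverse (x :: L')
              (fun d hd => ⟨x, List.mem_cons_self, hDle d (List.mem_reverse.mp hd)⟩)
              (fun a ha d hd => lt_of_lt_of_le (hKlt a (List.mem_reverse.mp ha))
                (hDle d (List.mem_reverse.mp hd)))]
      _ = (pvSel (S.reverse ++ (x :: L'))).reverse := by
            rw [show S.reverse = K.reverse ++ D.reverse by
              rw [hsplit]; simp]

-- ---- B's foldl equals the recursive scan ----

theorem pvFoldl_keepStep (S : List (Int × Int)) :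
    ∀ (acc : List (Int × Int)) (m : Option Int),
      (S.foldl pvKeepStep (acc, m)).1 = acc ++ pvScanB m S := by
  induction S with
  | nil => intro acc m; simp [pvScanB]
  | cons x xs ih =>
    intro acc m
    cases m with
    | none => simp [pvKeepStep, pvScanB, ih]
    | some mm =>
      by_cases h : mm < x.2
      · simp [pvKeepStep, pvScanB, h, ih]
      · simp [pvKeepStep, pvScanB, h, ih]

-- ---- B's scan is pvSel through the involution pvSig ----

theorem pvSig_sig (p : Int × Int) : pvSig (pvSig p) = p := by
  simp [pvSig]

def pvOk (m : Option Int) (e : Int) : Bool :=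
  match m with
  | none => true
  | some mm => decide (mm < e)

theorem pvScanB_append (T : List (Int × Int)) (x : Int × Int) :
    ∀ m : Option Int,
      pvScanB m (T ++ [x]) =
        pvScanB m T ++
          (if (pvOk m x.2 && T.all (fun y => decide (y.2 < x.2))) = true then [x] else []) := by
  induction T with
  | nil =>
    intro m
    cases m with
    | none => simp [pvScanB, pvOk]
    | some mm =>
      by_cases h : mm < x.2 <;> simp [pvScanB, pvOk, h]
  | cons y T ih =>
    intro m
    cases m with
    | none =>
      simp only [List.cons_append, pvScanB, List.all_cons, ih (some y.2), pvOk]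
      by_cases hy : y.2 < x.2
      · simp only [decide_eq_true hy, Bool.true_and]
      · simp only [decide_eq_false hy, Bool.false_and, Bool.and_false]
    | some mm =>
      simp only [List.cons_append, pvScanB, List.all_cons, pvOk]
      by_cases h : mm < y.2
      · simp only [if_pos h, ih (some y.2), pvOk]
        have hc : (decide (mm < x.2) && (decide (y.2 < x.2) && T.all (fun y => decide (y.2 < x.2))))
            = (decide (y.2 < x.2) && T.all (fun y => decide (y.2 < x.2))) := by
          by_cases hy : y.2 < x.2
          · have hmx : mm < x.2 := lt_trans h hy
            rw [decide_eq_true hmx, Bool.true_and]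
          · rw [decide_eq_false hy, Bool.false_and, Bool.and_false]
        simp only [hc]
        simp [List.cons_append]
      · simp only [if_neg h, ih (some mm), pvOk]
        have hc : (decide (mm < x.2) && (decide (y.2 < x.2) && T.all (fun y => decide (y.2 < x.2))))
            = (decide (mm < x.2) && T.all (fun y => decide (y.2 < x.2))) := by
          by_cases hx : mm < x.2
          · have hyx : y.2 < x.2 := lt_of_le_of_lt (not_lt.mp h) hx
            rw [decide_eq_true hyx, Bool.true_and]
          · rw [decide_eq_false hx, Bool.false_and, Bool.false_and]
        simp only [hc]
        rfl

theorem pvScanB_as_sel (S : List (Int × Int)) :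
    pvScanB none S = (List.map pvSig (pvSel (List.map pvSig S.reverse))).reverse := by
  induction S using List.reverseRecOn with
  | nil => simp [pvScanB, pvSel]
  | append_singleton T x ih =>
    have hrev : (T ++ [x]).reverse = x :: T.reverse := by simp
    rw [pvScanB_append T x none, hrev]
    simp only [pvOk, Bool.true_and]
    simp only [List.map_cons, pvSel]
    have hcond : ((List.map pvSig T.reverse).all (fun y => (pvSig x).1 < y.1) = true)
        ↔ (T.all (fun y => decide (y.2 < x.2)) = true) := by
      simp only [List.all_eq_true, List.mem_map, List.mem_reverse]
      constructor
      · intro h y hy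
        have := h (pvSig y) ⟨y, hy, rfl⟩
        simp only [pvSig, decide_eq_true_eq] at this ⊢
        omega
      · intro h z hz
        rcases hz with ⟨y, hy, rfl⟩
        have := h y hy
        simp only [pvSig, decide_eq_true_eq] at this ⊢
        omega
    by_cases hc : T.all (fun y => decide (y.2 < x.2)) = true
    · rw [if_pos (hcond.mpr hc)]
      simp [hc, ih, pvSig_sig]
    · rw [if_neg (fun h => hc (hcond.mp h))]
      simp [hc, ih]

-- ---- characterisation of pvSel: membership and chain ----

theorem pvSel_subset {M : List (Int × Int)} {v : Int × Int} (h : v ∈ pvSel M) : v ∈ M := by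
  induction M with
  | nil => exact absurd h (List.not_mem_nil)
  | cons x xs ih =>
    by_cases hc : xs.all (fun y => x.1 < y.1) = true
    · rw [pvSel, if_pos hc] at h
      rcases List.mem_cons.mp h with rfl | h
      · exact List.mem_cons_self
      · exact List.mem_cons_of_mem _ (ih h)
    · rw [pvSel, if_neg hc] at h
      exact List.mem_cons_of_mem _ (ih h)

theorem pvSel_chain (M : List (Int × Int)) :
    (pvSel M).Pairwise (fun a b => a.1 < b.1) := by
  induction M with
  | nil => exact List.Pairwise.nil
  | cons x xs ih =>
    by_cases hc : xs.all (fun y => x.1 < y.1) = true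
    · rw [pvSel, if_pos hc]
      refine List.pairwise_cons.mpr ⟨?_, ih⟩
      intro b hb
      have := (List.all_eq_true.mp hc) b (pvSel_subset hb)
      exact of_decide_eq_true this
    · rw [pvSel, if_neg hc]; exact ih

theorem pvMem_sel {E : List (Int × Int)} (hE : E.Pairwise pvRE) (v : Int × Int) :
    v ∈ pvSel E ↔ v ∈ E ∧ pvMaxl E v := by
  induction E with
  | nil => simp [pvSel, pvMaxl]
  | cons x xs ih =>
    rcases List.pairwise_cons.mp hE with ⟨hx, hxs⟩
    constructor
    · intro hv
      by_cases hc : xs.all (fun y => x.1 < y.1) = true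
      · rw [pvSel, if_pos hc] at hv
        rcases List.mem_cons.mp hv with rfl | hv
        · refine ⟨List.mem_cons_self, ?_⟩
          intro y hy hy1 hy2
          rcases List.mem_cons.mp hy with rfl | hy
          · rfl
          · have := of_decide_eq_true ((List.all_eq_true.mp hc) y hy)
            omega
        · rcases (ih hxs).mp hv with ⟨hv1, hv2⟩
          refine ⟨List.mem_cons_of_mem _ hv1, ?_⟩
          intro y hy hy1 hy2
          rcases List.mem_cons.mp hy with rfl | hy
          · have hre := hx v hv1
            unfold pvRE at hre
            have : y = v := by
              rcases hre with h | ⟨h1, h2⟩ <;> [omega; exact Prod.ext (by omega) (by omega)]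
            exact this
          · exact hv2 y hy hy1 hy2
      · rw [pvSel, if_neg hc] at hv
        rcases (ih hxs).mp hv with ⟨hv1, hv2⟩
        refine ⟨List.mem_cons_of_mem _ hv1, ?_⟩
        intro y hy hy1 hy2
        rcases List.mem_cons.mp hy with rfl | hy
        · have hre := hx v hv1
          unfold pvRE at hre
          exact Prod.ext (by omega) (by omega)
        · exact hv2 y hy hy1 hy2
    · rintro ⟨hv, hmax⟩
      rcases List.mem_cons.mp hv with rfl | hv
      · by_cases hvx : v ∈ xs
        · -- v also occurs later; use the IH occurrence
          have : v ∈ pvSel xs := (ih hxs).mpr ⟨hvx, fun y hy h1 h2 =>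
            hmax y (List.mem_cons_of_mem _ hy) h1 h2⟩
          by_cases hc : xs.all (fun y => v.1 < y.1) = true
          · rw [pvSel, if_pos hc]; exact List.mem_cons_of_mem _ this
          · rw [pvSel, if_neg hc]; exact this
        · have hc : xs.all (fun y => v.1 < y.1) = true := by
            simp only [List.all_eq_true]
            intro y hy
            have hre := hx y hy
            unfold pvRE at hre
            have hne : y ≠ v := fun h => hvx (h ▸ hy)
            by_contra hlt
            simp only [decide_eq_true_eq, not_lt] at hlt
            exact hne (hmax y (List.mem_cons_of_mem _ hy) hlt (by omega))
          rw [pvSel, if_pos hc]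
          exact List.mem_cons_self
      · have : v ∈ pvSel xs := (ih hxs).mpr ⟨hv, fun y hy h1 h2 =>
          hmax y (List.mem_cons_of_mem _ hy) h1 h2⟩
        by_cases hc : xs.all (fun y => x.1 < y.1) = true
        · rw [pvSel, if_pos hc]; exact List.mem_cons_of_mem _ this
        · rw [pvSel, if_neg hc]; exact this

-- pvMaxl depends on the list only through membership
theorem pvMaxl_congr {L L' : List (Int × Int)} (h : ∀ y, y ∈ L ↔ y ∈ L') (v : Int × Int) :
    pvMaxl L v ↔ pvMaxl L' v := by
  unfold pvMaxl
  exact ⟨fun H y hy => H y ((h y).mpr hy), fun H y hy => H y ((h y).mp hy)⟩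

-- the σ-image of the reversed start-sorted list is end-sorted
theorem pvSig_rev_pairwise {S : List (Int × Int)} (hS : S.Pairwise pvRS) :
    (List.map pvSig S.reverse).Pairwise pvRE := by
  rw [List.pairwise_map, List.pairwise_reverse]
  refine hS.imp ?_
  intro a b h
  unfold pvRS at h
  unfold pvRE pvSig
  simp only
  omega

theorem pvMaxl_sig {S : List (Int × Int)} (v : Int × Int) :
    pvMaxl (List.map pvSig S.reverse) (pvSig v) ↔ pvMaxl S v := by
  unfold pvMaxl
  constructor
  · intro H y hy h1 h2
    have := H (pvSig y) (by simp only [List.mem_map, List.mem_reverse]; exact ⟨y, hy, rfl⟩)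
      (by simp only [pvSig]; omega) (by simp only [pvSig]; omega)
    have := congrArg pvSig this
    simpa [pvSig_sig] using this
  · intro H y hy h1 h2
    simp only [List.mem_map, List.mem_reverse] at hy
    rcases hy with ⟨z, hz, rfl⟩
    simp only [pvSig] at h1 h2
    exact congrArg pvSig (H z hz (by omega) (by omega))

theorem pvMem_scanB {S : List (Int × Int)} (hS : S.Pairwise pvRS) (v : Int × Int) :
    v ∈ pvScanB none S ↔ v ∈ S ∧ pvMaxl S v := by
  rw [pvScanB_as_sel]
  simp only [List.mem_reverse, List.mem_map]
  constructor
  · rintro ⟨w, hw, rfl⟩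
    rcases (pvMem_sel (pvSig_rev_pairwise hS) w).mp hw with ⟨hw1, hw2⟩
    simp only [List.mem_map, List.mem_reverse] at hw1
    rcases hw1 with ⟨z, hz, rfl⟩
    rw [pvSig_sig]
    exact ⟨hz, (pvMaxl_sig z).mp hw2⟩
  · rintro ⟨hv, hmax⟩
    refine ⟨pvSig v, ?_, pvSig_sig v⟩
    refine (pvMem_sel (pvSig_rev_pairwise hS) (pvSig v)).mpr ⟨?_, (pvMaxl_sig v).mpr hmax⟩
    simp only [List.mem_map, List.mem_reverse]
    exact ⟨v, hv, rfl⟩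

theorem pvScanB_chain (S : List (Int × Int)) :
    (pvScanB none S).Pairwise (fun a b => a.2 < b.2) := by
  rw [pvScanB_as_sel, List.pairwise_reverse, List.pairwise_map]
  refine (pvSel_chain (List.map pvSig S.reverse)).imp ?_
  intro a b h
  simp only [pvSig] at h ⊢
  omega

-- two maximal elements are ordered the same way in both coordinates
theorem pvMaxl_lt {L : List (Int × Int)} {a b : Int × Int}
    (hma : pvMaxl L a) (hb : b ∈ L) (hab : a.2 < b.2) : a.1 < b.1 := by
  by_contra h
  have heq := hma b hb (by omega) (le_of_lt hab)
  subst heq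
  exact lt_irrefl _ hab

-- ===== VERDICT (by name: the statement is the Claim_ definition above) =====
theorem eraseInnerInterval_spec : Claim_equal_eraseInnerInterval := by
  intro intervals _
  unfold Spec_eraseInnerInterval eraseInnerInterval eraseInnerInterval_alt
  set E := PySem.List.sorted2 intervals (fun x => x.2) (fun x => -x.1) false with hEdef
  set S := PySem.List.sorted2 intervals (fun x => x.1) (fun x => -x.2) false with hSdef
  have hE : E.Pairwise pvRE := pvSortedE_pairwise intervals
  have hS : S.Pairwise pvRS := pvSortedS_pairwise intervals
  have hEperm : E.Perm intervals := PySem.List.sorted2_perm ..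
  have hSperm : S.Perm intervals := PySem.List.sorted2_perm ..
  have hA : (E.foldl pvPopPush []).reverse = pvSel E := by
    rw [pvStack_eq_sel E [] List.Pairwise.nil]
    simp
  rw [hA, pvFoldl_keepStep S [] none, List.nil_append]
  -- same membership
  have hmemES : ∀ y, y ∈ E ↔ y ∈ S := fun y =>
    ⟨fun h => hSperm.mem_iff.mpr (hEperm.mem_iff.mp h),
     fun h => hEperm.mem_iff.mpr (hSperm.mem_iff.mp h)⟩
  have hmem : ∀ v, v ∈ pvSel E ↔ v ∈ pvScanB none S := by
    intro v
    rw [pvMem_sel hE v, pvMem_scanB hS v, hmemES v, pvMaxl_congr hmemES v]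
  -- both strictly increasing in the first coordinate
  have hchainA : (pvSel E).Pairwise (fun a b => a.1 < b.1) := pvSel_chain E
  have hchainB : (pvScanB none S).Pairwise (fun a b => a.1 < b.1) := by
    have h2 := pvScanB_chain S
    refine List.Pairwise.imp_of_mem ?_ h2
    intro a b ha hb hab
    have hamem := (pvMem_scanB hS a).mp ha
    have hbmem := (pvMem_scanB hS b).mp hb
    exact pvMaxl_lt hamem.2 hbmem.1 hab
  -- nodup, perm, and equality of sorted lists
  have hndA : (pvSel E).Nodup := by
    refine hchainA.imp ?_
    intro a b h he
    subst he; omega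
  have hndB : (pvScanB none S).Nodup := by
    refine hchainB.imp ?_
    intro a b h he
    subst he; omega
  have hperm : (pvSel E).Perm (pvScanB none S) :=
    (List.perm_ext_iff_of_nodup hndA hndB).mpr hmem
  exact List.eq_of_perm_of_sorted
    (fun a b _ _ h1 h2 => absurd h2 (by omega)) hchainA hchainB hperm
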